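-- pv_equiv track=rewrite | github.com/yurim0628/algorithm | 프로그래머스/3/12987. 숫자 게임/숫자 게임.py | solution
-- ===== SOURCE A (Python) =====
-- def solution(A, B):
--     count = 0
--
--     A.sort()
--     B.sort()
--
--     idx_a, idx_b = 0, 0
--
--     while idx_a < len(A) and idx_b < len(B):
--         if A[idx_a] >= B[idx_b]:
--                 idx_b += 1
--         else:
--             idx_a += 1
--             idx_b += 1
--             count += 1
--
--     return count
-- ===== SOURCE B (Python) =====
-- def solution(A, B):
--     A.sort()
--     B.sort()
--     n, m = len(A), len(B)
--
--     def feasible(k):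
--         return all(A[i] < B[m - k + i] for i in range(k))
--
--     lo, hi = 0, min(n, m)
--     while lo < hi:
--         mid = (lo + hi + 1) // 2
--         if feasible(mid):
--             lo = mid
--         else:
--             hi = mid - 1
--     return lo
-- ===== Notes on version B (the rewrite author's own statement) =====
-- stated objective: alternative
-- what changed: Replaces A's greedy two-pointer scan by a binary search on the answer k, checking feasibility via the pairwise alignment 'each of the k smallest A is beaten by the aligned one of the k largest B'; B performs the same in-place sorts of both arguments.
import Mathlib
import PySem

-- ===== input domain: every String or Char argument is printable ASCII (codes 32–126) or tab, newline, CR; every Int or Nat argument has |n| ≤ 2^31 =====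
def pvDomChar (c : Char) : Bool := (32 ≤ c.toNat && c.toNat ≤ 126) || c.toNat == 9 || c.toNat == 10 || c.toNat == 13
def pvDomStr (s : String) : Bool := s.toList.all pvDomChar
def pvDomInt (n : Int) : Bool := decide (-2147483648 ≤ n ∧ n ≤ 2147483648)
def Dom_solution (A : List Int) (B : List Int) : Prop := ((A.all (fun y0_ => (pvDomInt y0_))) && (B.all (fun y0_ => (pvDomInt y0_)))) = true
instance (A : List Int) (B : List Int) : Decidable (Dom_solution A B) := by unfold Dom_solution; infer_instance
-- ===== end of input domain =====

-- B replaces A's greedy two-pointer scan by a binary search on the answer k with a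
-- pairwise alignment feasibility check; both Pythons sort their arguments in place
-- (same side effect), the equivalence proved is about the return value.

-- ===== PORT A =====
-- while idx_a < len(A) and idx_b < len(B): …  (indices only grow; guard keeps both accesses in range, so getD is exact)
def pvLoopA (a b : List Int) (ia ib : Nat) (count : Int) : Int :=
  if ia < a.length ∧ ib < b.length then
    if a.getD ia 0 ≥ b.getD ib 0 then pvLoopA a b ia (ib + 1) count
    else pvLoopA a b (ia + 1) (ib + 1) (count + 1)
  else count
termination_by b.length - ib
decreasing_by all_goals omega

def solution (A : List Int) (B : List Int) : Int :=
  let a := PySem.List.sorted A (fun x => x) false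
  let b := PySem.List.sorted B (fun x => x) false
  pvLoopA a b 0 0 0

-- ===== PORT B =====
-- feasible(k) = all(A[i] < B[m - k + i] for i in range(k)); within the search
-- 1 ≤ k ≤ min(n, m), so every index is in range and getD is exact.
def pvFeas (a b : List Int) (k : Nat) : Bool :=
  (List.range k).all (fun i => a.getD i 0 < b.getD (b.length - k + i) 0)

-- while lo < hi: mid = (lo + hi + 1) // 2; …  (lo, hi ≥ 0, so Nat division is exact)
def pvBS (a b : List Int) (lo hi : Nat) : Nat :=
  if lo < hi then
    let mid := (lo + hi + 1) / 2
    if pvFeas a b mid then pvBS a b mid hi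
    else pvBS a b lo (mid - 1)
  else lo
termination_by hi - lo
decreasing_by all_goals omega

def solution_alt (A : List Int) (B : List Int) : Int :=
  let a := PySem.List.sorted A (fun x => x) false
  let b := PySem.List.sorted B (fun x => x) false
  ((pvBS a b 0 (min a.length b.length) : Nat) : Int)

-- ===== PRECONDITION & SPEC =====
def Spec_solution (A : List Int) (B : List Int) (out : Int) : Prop := out = solution_alt A B
instance (A : List Int) (B : List Int) (out : Int) : Decidable (Spec_solution A B out) := by unfold Spec_solution; infer_instance

-- ===== CLAIM =====
def Claim_equal_solution : Prop := ∀ (A : List Int) (B : List Int), Dom_solution A B → Spec_solution A B (solution A B)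

-- ===== LEMMAS AND PROOFS =====

-- A's greedy scan as a structural recursion (Nat-valued count).
def fN : List Int → List Int → Nat
  | a :: as, b :: bs => if b ≤ a then fN (a :: as) bs else 1 + fN as bs
  | _, _ => 0
termination_by _ b => b.length

theorem fN_nil_right (as : List Int) : fN as [] = 0 := by
  cases as <;> simp [fN]

-- the loop of port A computes fN on the remaining suffixes
theorem pvLoopA_eq (a b : List Int) (ia ib : Nat) (count : Int) :
    pvLoopA a b ia ib count = count + (fN (a.drop ia) (b.drop ib) : Int) := by
  fun_induction pvLoopA a b ia ib count with
  | case1 ia ib count h hge ih =>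
      rw [ih]
      rw [List.drop_eq_getElem_cons h.1, List.drop_eq_getElem_cons h.2]
      simp only [fN]
      rw [if_pos (by simpa [List.getD_eq_getElem?_getD, List.getElem?_eq_getElem h.1,
          List.getElem?_eq_getElem h.2] using hge)]
  | case2 ia ib count h hge ih =>
      rw [ih]
      rw [List.drop_eq_getElem_cons h.1, List.drop_eq_getElem_cons h.2]
      simp only [fN]
      rw [if_neg]
      · push_cast; ring
      · simpa [List.getD_eq_getElem?_getD, List.getElem?_eq_getElem h.1,
          List.getElem?_eq_getElem h.2, not_le] using hge
  | case3 ia ib count h =>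
      rcases not_and_or.mp h with h' | h'
      · rw [List.drop_eq_nil_of_le (by omega)]
        simp [fN]
      · rw [List.drop_eq_nil_of_le (i := ib) (by omega)]
        simp [fN_nil_right]

-- feasibility of matching count k: the k smallest a's are beaten pairwise by the k largest b's
def FeasP (a b : List Int) (k : Nat) : Prop :=
  k ≤ a.length ∧ k ≤ b.length ∧ ∀ i < k, a.getD i 0 < b.getD (b.length - k + i) 0

theorem getD_mono (l : List Int) (hl : l.Pairwise (· ≤ ·)) (i j : Nat)
    (hij : i ≤ j) (hj : j < l.length) : l.getD i 0 ≤ l.getD j 0 := by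
  rcases eq_or_lt_of_le hij with rfl | hij
  · exact le_refl _
  · have hi : i < l.length := by omega
    rw [List.getD_eq_getElem l 0 hi, List.getD_eq_getElem l 0 hj]
    exact List.pairwise_iff_getElem.mp hl i j hi hj hij

-- the greedy count is feasible
theorem fN_feas (b : List Int) : ∀ (a : List Int), b.Pairwise (· ≤ ·) → FeasP a b (fN a b) := by
  induction b with
  | nil => intro a _; cases a <;> exact ⟨by simp [fN], by simp [fN], by simp [fN]⟩
  | cons b bs ih =>
    intro a hb
    have hbs : bs.Pairwise (· ≤ ·) := (List.pairwise_cons.mp hb).2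
    have hble : ∀ x ∈ bs, b ≤ x := (List.pairwise_cons.mp hb).1
    cases a with
    | nil => exact ⟨by simp [fN], by simp [fN], by simp [fN]⟩
    | cons a as =>
      by_cases hba : b ≤ a
      · -- discard b
        obtain ⟨h1, h2, h3⟩ := ih (a :: as) hbs
        refine ⟨by simpa [fN, hba] using h1, by simp [fN, hba]; omega, ?_⟩
        intro i hi
        simp only [fN, if_pos hba] at hi ⊢
        have : (b :: bs).length - fN (a :: as) bs + i
            = (bs.length - fN (a :: as) bs + i) + 1 := by simp; omega
        rw [this, List.getD_cons_succ]
        exact h3 i hi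
      · -- match a with b? no: match along a < b branch
        obtain ⟨h1, h2, h3⟩ := ih as hbs
        refine ⟨by simp [fN, hba]; omega, by simp [fN, hba]; omega, ?_⟩
        intro i hi
        simp only [fN, if_neg hba] at hi ⊢
        set g := fN as bs with hg
        cases i with
        | zero =>
          simp only [List.getD_cons_zero]
          rcases eq_or_lt_of_le h2 with hgm | hgm
          · have : (b :: bs).length - (1 + g) + 0 = 0 := by simp; omega
            rw [this, List.getD_cons_zero]; omega
          · have : (b :: bs).length - (1 + g) + 0 = (bs.length - g - 1) + 1 := by simp; omega
            rw [this, List.getD_cons_succ]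
            have hidx : bs.length - g - 1 < bs.length := by omega
            have hmem : bs.getD (bs.length - g - 1) 0 ∈ bs := by
              rw [List.getD_eq_getElem bs 0 hidx]; exact List.getElem_mem hidx
            have := hble _ hmem
            omega
        | succ j =>
          simp only [List.getD_cons_succ]
          have : (b :: bs).length - (1 + g) + (j + 1) = (bs.length - g + j) + 1 := by simp; omega
          rw [this, List.getD_cons_succ]
          exact h3 j (by omega)

-- the greedy count is maximal among feasible counts
theorem fN_max (b : List Int) : ∀ (a : List Int) (k : Nat), FeasP a b k → k ≤ fN a b := by
  induction b with
  | nil => intro a k h; have := h.2.1; simp at this; omega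
  | cons b bs ih =>
    intro a k h
    obtain ⟨h1, h2, h3⟩ := h
    cases a with
    | nil => simp at h1; omega
    | cons a as =>
      by_cases hba : b ≤ a
      · -- discard b
        simp only [fN, if_pos hba]
        have hkm : k ≤ bs.length := by
          by_contra hk
          have hk1 : k = bs.length + 1 := by simp at h2; omega
          have := h3 0 (by omega)
          rw [hk1] at this
          simp at this
          omega
        refine ih (a :: as) k ⟨h1, hkm, ?_⟩
        intro i hi
        have := h3 i hi
        have heq : (b :: bs).length - k + i = (bs.length - k + i) + 1 := by simp; omega
        rw [heq, List.getD_cons_succ] at this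
        exact this
      · -- match branch
        simp only [fN, if_neg hba]
        cases k with
        | zero => omega
        | succ k' =>
          have hk' : k' ≤ bs.length := by simp at h2; omega
          have : k' ≤ fN as bs := by
            refine ih as k' ⟨by simp at h1; omega, hk', ?_⟩
            intro i hi
            have := h3 (i + 1) (by omega)
            rw [List.getD_cons_succ] at this
            have heq : (b :: bs).length - (k' + 1) + (i + 1) = (bs.length - k' + i) + 1 := by
              simp; omega
            rw [heq, List.getD_cons_succ] at this
            exact this
          omega

-- feasibility is downward closed (needs b sorted)
theorem Feas_step (a b : List Int) (hb : b.Pairwise (· ≤ ·)) (k : Nat)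
    (h : FeasP a b (k + 1)) : FeasP a b k := by
  obtain ⟨h1, h2, h3⟩ := h
  refine ⟨by omega, by omega, ?_⟩
  intro i hi
  have hx := h3 i (by omega)
  have hk : k + 1 ≤ b.length := h2
  have hle : b.getD (b.length - (k + 1) + i) 0 ≤ b.getD (b.length - k + i) 0 :=
    getD_mono b hb _ _ (by omega) (by omega)
  omega

theorem Feas_le (a b : List Int) (hb : b.Pairwise (· ≤ ·)) :
    ∀ (k : Nat), FeasP a b k → ∀ j ≤ k, FeasP a b j := by
  intro k
  induction k with
  | zero =>
    intro h j hj
    have : j = 0 := by omega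
    subst this; exact h
  | succ k ih =>
    intro h j hj
    rcases Nat.eq_or_lt_of_le hj with rfl | hlt
    · exact h
    · exact ih (Feas_step a b hb k h) j (by omega)

theorem pvFeas_iff (a b : List Int) (k : Nat) :
    pvFeas a b k = true ↔ ∀ i < k, a.getD i 0 < b.getD (b.length - k + i) 0 := by
  simp [pvFeas, List.all_eq_true, List.mem_range]

-- binary-search correctness: with the invariant "lo is feasible, no feasible k exceeds hi",
-- the search returns the greedy count
theorem pvBS_eq (a b : List Int) (hb : b.Pairwise (· ≤ ·)) :
    ∀ (n lo hi : Nat), hi - lo ≤ n → FeasP a b lo → (∀ k, FeasP a b k → k ≤ hi) →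
      lo ≤ hi → hi ≤ a.length → hi ≤ b.length → pvBS a b lo hi = fN a b := by
  intro n
  induction n with
  | zero =>
    intro lo hi hfuel hlo hhi hle _ _
    have hEq : lo = hi := by omega
    rw [pvBS, if_neg (by omega)]
    have h1 := fN_max b a lo hlo
    have h2 := hhi (fN a b) (fN_feas b a hb)
    omega
  | succ n ih =>
    intro lo hi hfuel hlo hhi hle h2 h3
    by_cases hlt : lo < hi
    · rw [pvBS, if_pos hlt]
      show (if pvFeas a b ((lo + hi + 1) / 2) then pvBS a b ((lo + hi + 1) / 2) hi
            else pvBS a b lo ((lo + hi + 1) / 2 - 1)) = fN a b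
      set mid := (lo + hi + 1) / 2 with hmid
      have hm1 : lo < mid := by omega
      have hm2 : mid ≤ hi := by omega
      by_cases hf : pvFeas a b mid
      · rw [if_pos hf]
        refine ih mid hi (by omega) ⟨by omega, by omega, (pvFeas_iff a b mid).mp hf⟩ hhi hm2 h2 h3
      · rw [if_neg hf]
        refine ih lo (mid - 1) (by omega) hlo ?_ (by omega) (by omega) (by omega)
        intro k hk
        by_contra hkm
        have hmk : mid ≤ k := by omega
        have : FeasP a b mid := Feas_le a b hb k hk mid hmk
        exact hf ((pvFeas_iff a b mid).mpr this.2.2)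
    · have hEq : lo = hi := by omega
      rw [pvBS, if_neg hlt]
      have hA := fN_max b a lo hlo
      have hB := hhi (fN a b) (fN_feas b a hb)
      omega

-- ===== VERDICT (by name: the statement is the Claim_ definition above) =====
theorem solution_spec : Claim_equal_solution := by
  intro A B _
  unfold Spec_solution solution solution_alt
  rw [pvLoopA_eq]
  simp only [List.drop_zero, zero_add]
  have hb := PySem.List.sorted_pairwise B (fun x => x)
  have h := pvBS_eq (PySem.List.sorted A (fun x => x)) (PySem.List.sorted B (fun x => x)) hb
    (min (PySem.List.sorted A (fun x => x)).length (PySem.List.sorted B (fun x => x)).length)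
    0 (min (PySem.List.sorted A (fun x => x)).length (PySem.List.sorted B (fun x => x)).length)
    (by omega)
    ⟨Nat.zero_le _, Nat.zero_le _, fun i hi => absurd hi (Nat.not_lt_zero i)⟩
    (fun k hk => le_min hk.1 hk.2.1)
    (Nat.zero_le _) (Nat.min_le_left _ _) (Nat.min_le_right _ _)
  rw [h]
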